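-- pv_equiv track=rewrite | github.com/y2kappa/c-compiler | lexer.py | tokenise_array
-- ===== SOURCE A (Python) =====
-- def tokenise_array(to_tokenize_array, token, all_possible_tokens):
--     result = []
--
--     for to_tokenize_element in to_tokenize_array:
--
--         # this is to make sure we do not split '!=' into '!' and '='
--         if to_tokenize_element in all_possible_tokens:
--             result.append(to_tokenize_element)
--             continue
--
--         elements_between_tokens = to_tokenize_element.split(token)
--
--         # we take the element and split it into the noise
--         # between the tokens. then we build it back with
--         # the new elements being the noise between tokens
--         # and the tokens themselves.
--
--         for i in range(len(elements_between_tokens)):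
--
--             # we add the noise first, noise being the stuff in betwen the tokens
--             # it could be a group of tokens or literals or anything
--
--             # if the element between tokens is ""
--             # it means the token was first or last
--             # and there was nothing before or after that
--             # so we're not adding it
--
--             if elements_between_tokens[i] != "":
--                 result.append(elements_between_tokens[i])
--
--             # we add the token second
--
--             # when we reached the last element after the token
--             # we don't add it, because the tokens are ALWAYS
--             # in between the elements.
--
--             if i != len(elements_between_tokens)-1:
--                 result.append(token)
--
--     return result
-- ===== SOURCE B (Python) =====
-- def tokenise_array(to_tokenize_array, token, all_possible_tokens):
--     # Scanner-based re-implementation: instead of splitting each element and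
--     # stitching the token back between the parts, walk the element left to
--     # right with str.find, emitting each non-empty gap and each token
--     # occurrence as it is encountered.
--     def scan(element):
--         pieces = []
--         start = 0
--         while True:
--             i = element.find(token, start)
--             if i == -1:
--                 if start < len(element):
--                     pieces.append(element[start:])
--                 return pieces
--             if start < i:
--                 pieces.append(element[start:i])
--             pieces.append(token)
--             start = i + len(token)
--
--     result = []
--     for element in to_tokenize_array:
--         if element in all_possible_tokens:
--             result.append(element)
--         else:
--             result.extend(scan(element))
--     return result
-- ===== Notes on version B (the rewrite author's own statement) =====
-- stated objective: alternative
-- what changed: Replaces split-then-reassemble (A splits each element on the token and re-interleaves the token with an index loop over the parts) by a left-to-right str.find scanner that never calls split: it emits each non-empty gap and each token occurrence as it walks the element.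
import Mathlib
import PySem

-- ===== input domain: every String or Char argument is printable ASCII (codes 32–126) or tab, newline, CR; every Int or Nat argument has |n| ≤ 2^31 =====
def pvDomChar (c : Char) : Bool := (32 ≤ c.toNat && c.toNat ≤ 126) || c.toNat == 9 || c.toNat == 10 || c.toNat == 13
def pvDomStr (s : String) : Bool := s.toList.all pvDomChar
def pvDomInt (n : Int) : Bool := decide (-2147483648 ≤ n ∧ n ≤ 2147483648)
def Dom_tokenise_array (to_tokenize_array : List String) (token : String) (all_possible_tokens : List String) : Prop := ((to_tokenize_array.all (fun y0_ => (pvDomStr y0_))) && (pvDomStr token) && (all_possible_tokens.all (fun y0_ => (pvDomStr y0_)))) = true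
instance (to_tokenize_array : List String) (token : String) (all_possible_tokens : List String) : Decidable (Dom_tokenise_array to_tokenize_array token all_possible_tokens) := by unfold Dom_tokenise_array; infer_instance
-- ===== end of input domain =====

-- B replaces A's split-then-reinterleave by a left-to-right find-based scanner; same cost.

-- ===== PORT A =====
def tokenise_array (to_tokenize_array : List String) (token : String) (all_possible_tokens : List String) : List String :=
  to_tokenize_array.foldl (fun result el =>
    if all_possible_tokens.contains el then result ++ [el]
    else
      let parts := (PySem.Str.split? el token).getD []
      (PySem.List.pyRange 0 parts.length 1).foldl (fun r i =>
        let r' := if PySem.List.pyGetD parts i "" ≠ "" then r ++ [PySem.List.pyGetD parts i ""] else r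
        if i ≠ (parts.length : Int) - 1 then r' ++ [token] else r') result) []

-- ===== PORT B =====
-- Source B's inner while loop: `start` advances past each occurrence found by element.find(token, start);
-- fuel = element.length + 1 only makes the loop total (it never runs out when token ≠ "", proved below).
def pvScanB (s sep : List Char) : Nat → Nat → List (List Char)
  | 0, _ => []
  | fuel + 1, start =>
      let i := PySem.Chars.findFrom s sep (start : Int) none
      if i = -1 then
        (if start < s.length then [PySem.List.slice s (some (start : Int)) none] else [])
      else
        (if (start : Int) < i then [PySem.List.slice s (some (start : Int)) (some i)] else []) ++
          sep :: pvScanB s sep fuel (i.toNat + sep.length)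

def tokenise_array_alt (to_tokenize_array : List String) (token : String) (all_possible_tokens : List String) : List String :=
  to_tokenize_array.foldl (fun result el =>
    if all_possible_tokens.contains el then result ++ [el]
    else result ++ (pvScanB el.toList token.toList (el.toList.length + 1) 0).map String.ofList) []

-- ===== PRECONDITION & SPEC =====
-- Pre_ excludes exactly the inputs where Python A raises ValueError: an empty token
-- reaching str.split (i.e. token = "" while some element is not in all_possible_tokens).
def Pre_tokenise_array (to_tokenize_array : List String) (token : String) (all_possible_tokens : List String) : Prop :=
  token ≠ "" ∨ ∀ el ∈ to_tokenize_array, all_possible_tokens.contains el = true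
instance (to_tokenize_array : List String) (token : String) (all_possible_tokens : List String) : Decidable (Pre_tokenise_array to_tokenize_array token all_possible_tokens) := by unfold Pre_tokenise_array; infer_instance
def pvWitness_tokenise_array : List String × String × List String := (["a+b", "+", ""], "+", ["+"])

def Spec_tokenise_array (to_tokenize_array : List String) (token : String) (all_possible_tokens : List String) (out : List String) : Prop := out = tokenise_array_alt to_tokenize_array token all_possible_tokens
instance (to_tokenize_array : List String) (token : String) (all_possible_tokens : List String) (out : List String) : Decidable (Spec_tokenise_array to_tokenize_array token all_possible_tokens out) := by unfold Spec_tokenise_array; infer_instance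

-- ===== CLAIM (what is proved, stated in full; the proofs are below) =====
def Claim_equal_tokenise_array : Prop := ∀ (to_tokenize_array : List String) (token : String) (all_possible_tokens : List String), Dom_tokenise_array to_tokenize_array token all_possible_tokens → Pre_tokenise_array to_tokenize_array token all_possible_tokens → Spec_tokenise_array to_tokenize_array token all_possible_tokens (tokenise_array to_tokenize_array token all_possible_tokens)

-- ===== LEMMAS AND PROOFS =====

-- clean recursive form of str.split(sep) (sep ≠ []): `pre` is the noise accumulated so far
def pvParts (sep l pre : List Char) : List (List Char) :=
  if h : sep ≠ [] ∧ 0 ≤ PySem.Chars.find l sep then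
    -- (h is used by the termination proof below)
    (pre ++ l.take (PySem.Chars.find l sep).toNat) ::
      pvParts sep (l.drop ((PySem.Chars.find l sep).toNat + sep.length)) []
  else [pre ++ l]
termination_by l.length
decreasing_by
  have hinf : sep <:+: l := (PySem.Chars.find_nonneg_iff l sep).mp h.2
  have := List.IsInfix.length_le hinf
  have hsep : 0 < sep.length := List.length_pos_iff.mpr h.1
  simp only [List.length_drop]
  omega

-- filter-out-empties of (parts interspersed with sep), structurally (chars level)
def pvInterC (sep : List Char) : List (List Char) → List (List Char)
  | [] => []
  | [p] => if p ≠ [] then [p] else []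
  | p :: q :: rest => (if p ≠ [] then [p] else []) ++ sep :: pvInterC sep (q :: rest)

-- same at String level (the value A's index loop produces from the split parts)
def pvInterS (t : String) : List String → List String
  | [] => []
  | [p] => if p ≠ "" then [p] else []
  | p :: q :: rest => (if p ≠ "" then [p] else []) ++ t :: pvInterS t (q :: rest)

theorem pvParts_ne_nil (sep l pre : List Char) : pvParts sep l pre ≠ [] := by
  unfold pvParts; split <;> simp

theorem find_eq_of (s sub : List Char) (m : Nat) (h1 : sub <+: s.drop m)
    (h2 : ∀ i < m, ¬ sub <+: s.drop i) : PySem.Chars.find s sub = m := by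
  have hinf : sub <:+: s := h1.isInfix.trans (List.drop_suffix m s).isInfix
  have hnn : 0 ≤ PySem.Chars.find s sub := (PySem.Chars.find_nonneg_iff s sub).mpr hinf
  obtain ⟨hpre, hmin⟩ := PySem.Chars.find_spec hnn
  have : (PySem.Chars.find s sub).toNat = m := by
    by_contra hne
    rcases Nat.lt_or_ge (PySem.Chars.find s sub).toNat m with hlt | hge
    · exact h2 _ hlt hpre
    · exact hmin m (by omega) h1
  omega

theorem find_prefix (s sub : List Char) (h : sub <+: s) : PySem.Chars.find s sub = 0 :=
  find_eq_of s sub 0 (by simpa using h) (by omega)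

theorem find_cons_shift (c : Char) (rest sub : List Char) (h0 : ¬ sub <+: c :: rest)
    (hk : 0 ≤ PySem.Chars.find rest sub) :
    PySem.Chars.find (c :: rest) sub = PySem.Chars.find rest sub + 1 := by
  obtain ⟨hpre, hmin⟩ := PySem.Chars.find_spec hk
  have := find_eq_of (c :: rest) sub ((PySem.Chars.find rest sub).toNat + 1)
    (by simpa using hpre)
    (by
      intro i hi
      cases i with
      | zero => simpa using h0
      | succ j => intro hj; exact hmin j (by omega) (by simpa using hj))
  omega

theorem infix_cons_iff' (sub : List Char) (c : Char) (rest : List Char) :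
    sub <:+: c :: rest ↔ sub <+: c :: rest ∨ sub <:+: rest := List.infix_cons_iff

-- stepping one character when sep does not match at the front
theorem pvParts_cons (sep : List Char) (c : Char) (rest pre : List Char)
    (hsep : sep ≠ []) (h0 : ¬ sep <+: c :: rest) :
    pvParts sep (c :: rest) pre = pvParts sep rest (pre ++ [c]) := by
  by_cases hr : 0 ≤ PySem.Chars.find rest sep
  · have hshift := find_cons_shift c rest sep h0 hr
    rw [pvParts, dif_pos ⟨hsep, by omega⟩]
    conv_rhs => rw [pvParts]
    rw [dif_pos ⟨hsep, hr⟩]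
    have ht : (PySem.Chars.find (c :: rest) sep).toNat = (PySem.Chars.find rest sep).toNat + 1 := by omega
    have harith : (PySem.Chars.find rest sep).toNat + 1 + sep.length
        = ((PySem.Chars.find rest sep).toNat + sep.length) + 1 := by omega
    rw [ht, harith]
    simp [List.take_succ_cons, List.drop_succ_cons]
  · have hni : ¬ sep <:+: rest := fun h => hr ((PySem.Chars.find_nonneg_iff rest sep).mpr h)
    have hni' : ¬ sep <:+: c :: rest := by
      rw [infix_cons_iff']; tauto
    have hc : ¬ 0 ≤ PySem.Chars.find (c :: rest) sep :=
      fun h => hni' ((PySem.Chars.find_nonneg_iff _ sep).mp h)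
    rw [pvParts, dif_neg (by tauto)]
    rw [pvParts, dif_neg (by tauto)]
    simp

-- splitOn.go computes pvParts
theorem go_eq_pvParts (sep : List Char) (hsep : sep ≠ []) :
    ∀ (fuel : Nat) (l cur : List Char) (acc : List (List Char)), l.length + 1 ≤ fuel →
    PySem.Chars.splitOn.go sep fuel l cur acc = acc.reverse ++ pvParts sep l cur.reverse := by
  intro fuel
  induction fuel with
  | zero => intro l cur acc h; omega
  | succ f ih =>
    intro l cur acc h
    cases l with
    | nil =>
      rw [PySem.Chars.splitOn.go]
      have hng : ¬ (sep ≠ [] ∧ 0 ≤ PySem.Chars.find [] sep) := by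
        rintro ⟨h1, h2⟩
        have := (PySem.Chars.find_nonneg_iff [] sep).mp h2
        simp at this
        exact h1 this
      rw [pvParts, dif_neg hng]
      simp
      omega
    | cons c rest =>
      rw [PySem.Chars.splitOn.go]
      by_cases hp : sep.isPrefixOf (c :: rest)
      · have hpre : sep <+: c :: rest := List.isPrefixOf_iff_prefix.mp hp
        have hf : PySem.Chars.find (c :: rest) sep = 0 := find_prefix _ _ hpre
        have hlen : 0 < sep.length := List.length_pos_iff.mpr hsep
        have hfu : (List.drop sep.length (c :: rest)).length + 1 ≤ f := by
          simp only [List.length_drop, List.length_cons]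
          simp only [List.length_cons] at h
          omega
        rw [if_pos hp, ih (List.drop sep.length (c :: rest)) [] (cur.reverse :: acc) hfu]
        conv_rhs => rw [pvParts]
        rw [dif_pos ⟨hsep, by rw [hf]⟩, hf]
        simp
      · have hpre : ¬ sep <+: c :: rest := fun hq => hp (List.isPrefixOf_iff_prefix.mpr hq)
        rw [if_neg hp]
        rw [ih rest (c :: cur) acc (by simp at h ⊢; omega)]
        rw [pvParts_cons sep c rest cur.reverse hsep hpre]
        simp

theorem splitOn_eq_pvParts (s sep : List Char) (hsep : sep ≠ []) :
    PySem.Chars.splitOn s sep = pvParts sep s [] := by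
  unfold PySem.Chars.splitOn
  rw [go_eq_pvParts sep hsep (s.length + 1) s [] [] (by omega)]
  simp

-- B's scanner computes pvInterC of the split parts
theorem pvScanB_eq (s sep : List Char) (hsep : sep ≠ []) :
    ∀ (fuel start : Nat), start ≤ s.length → s.length - start + 1 ≤ fuel →
    pvScanB s sep fuel start = pvInterC sep (pvParts sep (s.drop start) []) := by
  intro fuel
  induction fuel with
  | zero => intro start h1 h2; omega
  | succ f ih =>
    intro start hstart hfuel
    rw [pvScanB]
    rw [PySem.Chars.findFrom_natCast s sep start hstart]
    set t := s.drop start with ht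
    by_cases hf : PySem.Chars.find t sep = -1
    · rw [if_pos (by rw [hf]; simp)]
      have hni : ¬ sep <:+: t := (PySem.Chars.find_eq_neg_one_iff t sep).mp hf
      have hng : ¬ (sep ≠ [] ∧ 0 ≤ PySem.Chars.find t sep) := by
        rintro ⟨-, h2⟩; exact hni ((PySem.Chars.find_nonneg_iff t sep).mp h2)
      rw [pvParts, dif_neg hng]
      simp only [List.nil_append]
      by_cases hlt : start < s.length
      · have htne : t ≠ [] := by
          rw [ht]; simp [List.drop_eq_nil_iff]; omega
        rw [if_pos hlt]
        rw [PySem.List.slice_from s (by exact_mod_cast Int.natCast_nonneg start)]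
        simp [pvInterC, ht]
        exact hlt
      · have htnil : t = [] := by
          rw [ht]; simp [List.drop_eq_nil_iff]; omega
        rw [if_neg hlt, htnil]
        simp [pvInterC]
    · have hnn : 0 ≤ PySem.Chars.find t sep := by
        have := PySem.Chars.neg_one_le_find t sep; omega
      obtain ⟨hpre, -⟩ := PySem.Chars.find_spec hnn
      set k := (PySem.Chars.find t sep).toNat with hk
      have hfind : PySem.Chars.find t sep = (k : Int) := by omega
      have hkl : k + sep.length ≤ t.length := by
        have h1 := List.IsPrefix.length_le hpre
        simp [List.length_drop] at h1
        have hkle : (k : Int) ≤ t.length := by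
          rw [← hfind]; exact PySem.Chars.find_le_length t sep
        omega
      have htlen : t.length = s.length - start := by rw [ht]; simp
      have hsl : 0 < sep.length := List.length_pos_iff.mpr hsep
      rw [hfind]
      have hkne : ¬ ((k : Int) = -1) := by omega
      rw [if_neg hkne]
      have hsne : ¬ ((start : Int) + (k : Int) = -1) := by omega
      rw [if_neg hsne]
      have hcollapse : ((start : Int) + (k : Int)).toNat + sep.length = start + k + sep.length := by omega
      rw [hcollapse]
      rw [ih (start + k + sep.length) (by omega) (by omega)]
      -- unfold one step of pvParts on t
      conv_rhs => rw [pvParts]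
      rw [dif_pos ⟨hsep, hnn⟩, ← hk]
      have hdrop : List.drop (k + sep.length) t = s.drop (start + k + sep.length) := by
        rw [ht, List.drop_drop]; ring_nf
      rw [hdrop]
      obtain ⟨q, rest, hqr⟩ := List.exists_cons_of_ne_nil
        (pvParts_ne_nil sep (s.drop (start + k + sep.length)) [])
      rw [hqr, pvInterC]
      have hslice : PySem.List.slice s (some (start : Int)) (some ((start : Int) + (k : Int))) = t.take k := by
        have hcast : (start : Int) + (k : Int) = ((start + k : Nat) : Int) := by push_cast; ring
        rw [hcast, PySem.List.slice_natCast, ← ht]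
        congr 1
        omega
      by_cases hkpos : 0 < k
      · have hlt : (start : Int) < (start : Int) + (k : Int) := by exact_mod_cast (by omega : (start:Int) < start + k)
        rw [if_pos hlt, hslice]
        have htk : t.take k ≠ [] := by
          simp [List.take_eq_nil_iff]
          constructor
          · omega
          · intro hteq; rw [hteq] at hkl; simp at hkl; omega
        simp [htk]
      · have hk0 : k = 0 := by omega
        rw [if_neg (by omega)]
        rw [hk0]
        simp

-- mapping String.ofList through the chars-level interleaver
theorem pvInterS_map (t : String) :
    ∀ cs : List (List Char), pvInterS t (cs.map String.ofList) = (pvInterC t.toList cs).map String.ofList := by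
  intro cs
  induction cs with
  | nil => simp [pvInterS, pvInterC]
  | cons p rest ih =>
    cases rest with
    | nil =>
      by_cases hp : p = [] <;>
        simp [pvInterS, pvInterC, hp, String.ofList_eq_empty_iff]
    | cons q rest' =>
      rw [pvInterC]
      simp only [List.map_cons]
      rw [pvInterS, ← List.map_cons, ih]
      by_cases hp : p = [] <;>
        simp [hp, String.ofList_eq_empty_iff, String.ofList_toList]

-- A's inner index loop over the suffix of parts starting at index a produces pvInterS
theorem inner_loop_eq (t : String) (parts : List String) :
    ∀ (k : Nat) (a : Nat) (r : List String), parts.length - a = k → a ≤ parts.length →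
    (PySem.List.pyRange a parts.length 1).foldl (fun r i =>
        if i ≠ (parts.length : Int) - 1 then
          (if PySem.List.pyGetD parts i "" ≠ "" then r ++ [PySem.List.pyGetD parts i ""] else r) ++ [t]
        else
          (if PySem.List.pyGetD parts i "" ≠ "" then r ++ [PySem.List.pyGetD parts i ""] else r)) r
      = r ++ pvInterS t (parts.drop a) := by
  intro k
  induction k with
  | zero =>
    intro a r hk ha
    have ha' : a = parts.length := by omega
    subst ha'
    rw [PySem.List.pyRange_one_eq_nil (by simp)]
    simp [pvInterS]
  | succ k ih =>
    intro a r hk ha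
    have halt : a < parts.length := by omega
    rw [PySem.List.pyRange_one_cons (by exact_mod_cast halt)]
    simp only [List.foldl_cons]
    rw [show ((a : Int) + 1) = ((a + 1 : Nat) : Int) by push_cast; ring]
    rw [ih (a + 1) _ (by omega) (by omega)]
    have hget : PySem.List.pyGetD parts (a : Int) "" = parts[a] := by
      rw [PySem.List.pyGetD_natCast]; simp [List.getD, halt]
    have hdrop : parts.drop a = parts[a] :: parts.drop (a + 1) := List.drop_eq_getElem_cons halt
    rw [hget, hdrop]
    by_cases hlast : a = parts.length - 1
    · have hdone : parts.drop (a + 1) = [] := by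
        apply List.drop_eq_nil_of_le; omega
      have hne : ¬ ((a : Int) ≠ (parts.length : Int) - 1) := by omega
      rw [hdone, if_neg hne]
      by_cases hp : parts[a] = "" <;> simp [pvInterS, hp]
    · have hne : (a : Int) ≠ (parts.length : Int) - 1 := by omega
      rw [if_pos hne]
      have hnn : parts.drop (a + 1) ≠ [] := by
        simp [List.drop_eq_nil_iff]; omega
      obtain ⟨q, rest', hqr⟩ := List.exists_cons_of_ne_nil hnn
      rw [hqr]
      by_cases hp : parts[a] = "" <;> simp [pvInterS, hp]

-- per non-token element, token ≠ "": A's step appends exactly B's scanner pieces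
theorem step_eq (t : String) (ht : t ≠ "") (el : String) (r : List String) :
    (let parts := (PySem.Str.split? el t).getD []
     (PySem.List.pyRange 0 parts.length 1).foldl (fun r i =>
       let r' := if PySem.List.pyGetD parts i "" ≠ "" then r ++ [PySem.List.pyGetD parts i ""] else r
       if i ≠ (parts.length : Int) - 1 then r' ++ [t] else r') r)
    = r ++ (pvScanB el.toList t.toList (el.toList.length + 1) 0).map String.ofList := by
  have hsep : t.toList ≠ [] := by
    intro hcon
    exact ht (by rw [← String.ofList_toList (s := t), hcon])
  have hsplit : (PySem.Str.split? el t).getD []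
      = (PySem.Chars.splitOn el.toList t.toList).map String.ofList := by
    simp [PySem.Str.split?, PySem.Chars.split?, List.isEmpty_iff, hsep]
  have hscan := pvScanB_eq el.toList t.toList hsep (el.toList.length + 1) 0 (by omega) (by omega)
  rw [hscan, List.drop_zero, ← splitOn_eq_pvParts el.toList t.toList hsep]
  rw [← pvInterS_map t, ← hsplit]
  have := inner_loop_eq t ((PySem.Str.split? el t).getD [])
    ((PySem.Str.split? el t).getD []).length 0 r (by omega) (by omega)
  simp only [Nat.cast_zero] at this
  simpa [List.drop_zero] using this

-- ===== VERDICT (by name: the statement is the Claim_ definition above) =====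
theorem tokenise_array_spec : Claim_equal_tokenise_array := by
  intro arr token toks _ hpre
  unfold Spec_tokenise_array tokenise_array tokenise_array_alt
  cases hpre with
  | inl ht =>
    apply PySem.List.foldl_congr_mem
    intro acc x _
    by_cases hc : toks.contains x = true
    · rw [if_pos hc]; rw [if_pos hc]
    · rw [if_neg hc]; rw [if_neg hc]
      exact step_eq token ht x acc
  | inr hall =>
    apply PySem.List.foldl_congr_mem
    intro acc x hx
    rw [if_pos (hall x hx)]; rw [if_pos (hall x hx)]
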